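-- pv_equiv track=rewrite | github.com/eladkap/leetcode | amazon.py | get_max_sub_array_with_powers_of_two
-- ===== SOURCE A (Python) =====
-- def is_power_of_two(num: int) -> bool:
--     return num & (num - 1) == 0 and num > 0
--
-- def get_max_sub_array_with_powers_of_two(arr: list):
--     max_length = 0
--     start_index = 0
--     end_index = 0
--     n = len(arr)
--
--     i = 0
--     while i < n:
--         j = i
--         count = 0
--         while j < n and is_power_of_two(arr[j]):
--             j += 1
--             count += 1
--         if count > max_length:
--             max_length = count
--             start_index = j - count
--             end_index = j - 1
--         i += 1
--
--     return arr[start_index:end_index + 1]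
-- ===== SOURCE B (Python) =====
-- def is_power_of_two(num: int) -> bool:
--     return num & (num - 1) == 0 and num > 0
--
-- def get_max_sub_array_with_powers_of_two(arr: list):
--     # One linear pass: track the length of the current run of power-of-two
--     # values and remember the first longest run seen so far.
--     max_length = 0
--     start_index = 0
--     end_index = 0
--     cur = 0
--     for i, x in enumerate(arr):
--         if is_power_of_two(x):
--             cur += 1
--             if cur > max_length:
--                 max_length = cur
--                 start_index = i + 1 - cur
--                 end_index = i
--         else:
--             cur = 0
--     return arr[start_index:end_index + 1]
-- ===== Notes on version B (the rewrite author's own statement) =====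
-- stated objective: faster
-- what changed: Replaced A's nested scan (re-counting the full run of powers of two from every index) by a single linear pass that maintains the current run length and the first longest run seen.
import Mathlib
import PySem

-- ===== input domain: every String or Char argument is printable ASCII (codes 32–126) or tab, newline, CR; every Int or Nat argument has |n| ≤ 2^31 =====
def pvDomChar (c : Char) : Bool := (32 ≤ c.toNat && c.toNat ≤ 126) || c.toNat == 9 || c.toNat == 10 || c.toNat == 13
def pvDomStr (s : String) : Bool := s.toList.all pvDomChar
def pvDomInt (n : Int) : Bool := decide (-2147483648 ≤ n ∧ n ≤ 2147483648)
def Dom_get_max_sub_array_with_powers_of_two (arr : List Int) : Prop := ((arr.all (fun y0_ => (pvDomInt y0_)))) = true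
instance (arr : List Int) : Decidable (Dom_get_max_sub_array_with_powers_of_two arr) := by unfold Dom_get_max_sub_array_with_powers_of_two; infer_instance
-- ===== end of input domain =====

-- B replaces A's nested rescanning by one linear pass over the array, keeping A's
-- (max_length, start_index, end_index) result convention; same return value is proved for all inputs.

-- ===== PORT A =====

def isPowerOfTwo (num : Int) : Bool :=
  (PySem.Int.band num (num - 1) == 0) && (num > 0)

-- inner 'while j < n and is_power_of_two(arr[j])' loop: returns final (j, count)
def innerA (arr : List Int) (j count : Nat) : Nat × Nat :=
  if h : j < arr.length ∧ isPowerOfTwo (arr.getD j 0) = true then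
    innerA arr (j + 1) (count + 1)
  else (j, count)
termination_by arr.length - j
decreasing_by omega

-- outer 'while i < n' loop carrying (max_length, start_index, end_index)
def outerA (arr : List Int) (i ml si ei : Nat) : Nat × Nat × Nat :=
  if _h : i < arr.length then
    let jc := innerA arr i 0
    if jc.2 > ml then outerA arr (i + 1) jc.2 (jc.1 - jc.2) (jc.1 - 1)
    else outerA arr (i + 1) ml si ei
  else (ml, si, ei)
termination_by arr.length - i
decreasing_by all_goals omega

def get_max_sub_array_with_powers_of_two (arr : List Int) : List Int :=
  let st := outerA arr 0 0 0 0
  PySem.List.slice arr (some (st.2.1 : Int)) (some ((st.2.2 : Int) + 1))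

-- ===== PORT B =====

-- the 'for i, x in enumerate(arr)' loop of B, state (max_length, start_index, end_index, cur)
def bloop (arr : List Int) (i best bs be cur : Nat) : Nat × Nat × Nat × Nat :=
  match arr with
  | [] => (best, bs, be, cur)
  | x :: xs =>
    if isPowerOfTwo x then
      if cur + 1 > best then bloop xs (i + 1) (cur + 1) (i + 1 - (cur + 1)) i (cur + 1)
      else bloop xs (i + 1) best bs be (cur + 1)
    else bloop xs (i + 1) best bs be 0

def get_max_sub_array_with_powers_of_two_alt (arr : List Int) : List Int :=
  let st := bloop arr 0 0 0 0 0
  PySem.List.slice arr (some (st.2.1 : Int)) (some ((st.2.2.1 : Int) + 1))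

-- ===== PRECONDITION & SPEC =====
def Spec_get_max_sub_array_with_powers_of_two (arr : List Int) (out : List Int) : Prop := out = get_max_sub_array_with_powers_of_two_alt arr
instance (arr : List Int) (out : List Int) : Decidable (Spec_get_max_sub_array_with_powers_of_two arr out) := by
  unfold Spec_get_max_sub_array_with_powers_of_two; infer_instance

-- ===== CLAIM (what is proved, stated in full; the proofs are below) =====
def Claim_equal_get_max_sub_array_with_powers_of_two : Prop := ∀ (arr : List Int), Dom_get_max_sub_array_with_powers_of_two arr → Spec_get_max_sub_array_with_powers_of_two arr (get_max_sub_array_with_powers_of_two arr)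

-- ===== LEMMAS AND PROOFS =====

-- length of the leading run of powers of two
def runAt : List Int → Nat
  | [] => 0
  | x :: xs => if isPowerOfTwo x then runAt xs + 1 else 0

-- canonical answer: (length of longest run, start of the first longest run)
def canon : List Int → Nat × Nat
  | [] => (0, 0)
  | x :: xs =>
    if runAt (x :: xs) ≥ (canon xs).1 then (runAt (x :: xs), 0)
    else ((canon xs).1, (canon xs).2 + 1)

-- final value of B's 'cur'
def bcur : List Int → Nat → Nat
  | [], c => c
  | x :: xs, c => bcur xs (if isPowerOfTwo x then c + 1 else 0)

-- structural rewrite of A's outer loop over the suffix list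
def sfold : List Int → Nat → Nat × Nat × Nat → Nat × Nat × Nat
  | [], _, st => st
  | x :: xs, i, (ml, si, ei) =>
    sfold xs (i + 1)
      (if runAt (x :: xs) > ml then (runAt (x :: xs), i, i + runAt (x :: xs) - 1) else (ml, si, ei))

theorem canon_fst_ge_runAt (l : List Int) : runAt l ≤ (canon l).1 := by
  cases l with
  | nil => simp [runAt, canon]
  | cons x xs =>
    simp only [canon]
    split
    · simp
    · dsimp only; omega

theorem canon_of_runAt_ge (l : List Int) (h : (canon l).1 ≤ runAt l) : canon l = (runAt l, 0) := by
  cases l with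
  | nil => rfl
  | cons x xs =>
    by_cases hc : (canon xs).1 ≤ runAt (x :: xs)
    · simp [canon, hc, ge_iff_le]
    · exfalso
      have hx : canon (x :: xs) = ((canon xs).1, (canon xs).2 + 1) := by
        simp [canon, ge_iff_le, hc]
      rw [hx] at h
      dsimp only at h
      omega

theorem innerA_eq (arr : List Int) (j c : Nat) :
    innerA arr j c = (j + runAt (arr.drop j), c + runAt (arr.drop j)) := by
  induction hn : arr.length - j generalizing j c with
  | zero =>
    have hj : arr.length ≤ j := by omega
    have hd : arr.drop j = [] := List.drop_eq_nil_of_le hj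
    rw [innerA, dif_neg (by intro h; omega)]
    simp [hd, runAt]
  | succ n ih =>
    have hj : j < arr.length := by omega
    have hd : arr.drop j = arr[j] :: arr.drop (j + 1) := List.drop_eq_getElem_cons hj
    have hgd : arr.getD j 0 = arr[j] := List.getD_eq_getElem arr 0 hj
    by_cases hp : isPowerOfTwo arr[j] = true
    · rw [innerA, dif_pos ⟨hj, by rw [hgd]; exact hp⟩, ih (j + 1) (c + 1) (by omega)]
      rw [hd]
      simp only [runAt, hp, if_true]
      simp only [Prod.mk.injEq]
      omega
    · rw [innerA, dif_neg (by rintro ⟨-, h⟩; rw [hgd] at h; exact hp h)]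
      rw [hd]
      simp only [Bool.not_eq_true] at hp
      simp [runAt, hp]

theorem outerA_eq_sfold (arr : List Int) (i ml si ei : Nat) :
    outerA arr i ml si ei = sfold (arr.drop i) i (ml, si, ei) := by
  induction hn : arr.length - i generalizing i ml si ei with
  | zero =>
    have hd : arr.drop i = [] := List.drop_eq_nil_of_le (by omega)
    rw [outerA, dif_neg (by omega)]
    simp [hd, sfold]
  | succ n ih =>
    have hi : i < arr.length := by omega
    have hd : arr.drop i = arr[i] :: arr.drop (i + 1) := List.drop_eq_getElem_cons hi
    rw [outerA, dif_pos hi]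
    simp only [innerA_eq arr i 0, Nat.zero_add]
    rw [hd]
    simp only [sfold]
    rw [← hd]
    by_cases hgt : runAt (arr.drop i) > ml
    · rw [if_pos hgt, if_pos hgt, ih (i + 1) _ _ _ (by omega), Nat.add_sub_cancel]
    · rw [if_neg hgt, if_neg hgt, ih (i + 1) _ _ _ (by omega)]

theorem sfold_eq_canon (l : List Int) (i ml si ei : Nat) :
    sfold l i (ml, si, ei) =
      (if (canon l).1 > ml then ((canon l).1, i + (canon l).2, i + (canon l).2 + (canon l).1 - 1)
       else (ml, si, ei)) := by
  induction l generalizing i ml si ei with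
  | nil => simp [sfold, canon]
  | cons x xs ih =>
    have hge := canon_fst_ge_runAt xs
    simp only [sfold]
    by_cases hc : (canon xs).1 ≤ runAt (x :: xs)
    · have hcx : canon (x :: xs) = (runAt (x :: xs), 0) := by simp [canon, ge_iff_le, hc]
      rw [hcx]
      dsimp only
      by_cases h1 : runAt (x :: xs) > ml
      · rw [if_pos h1, ih]
        split_ifs <;> simp only [Prod.mk.injEq, true_and, and_true] <;> omega
      · rw [if_neg h1, ih]
        split_ifs <;> simp only [Prod.mk.injEq, true_and, and_true] <;> omega
    · have hcx : canon (x :: xs) = ((canon xs).1, (canon xs).2 + 1) := by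
        simp [canon, ge_iff_le, hc]
      rw [hcx]
      dsimp only
      by_cases h1 : runAt (x :: xs) > ml
      · rw [if_pos h1, ih]
        split_ifs <;> simp only [Prod.mk.injEq, true_and, and_true] <;> omega
      · rw [if_neg h1, ih]
        split_ifs <;> simp only [Prod.mk.injEq, true_and, and_true] <;> omega

theorem bloop_eq_canon (l : List Int) (i best bs be cur : Nat) (hci : cur ≤ i) (hcb : cur ≤ best) :
    bloop l i best bs be cur =
      (if cur + runAt l ≥ (canon l).1 then
        (if cur + runAt l > best then
          (cur + runAt l, i - cur, i - cur + (cur + runAt l) - 1, bcur l cur)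
         else (best, bs, be, bcur l cur))
       else
        (if (canon l).1 > best then
          ((canon l).1, i + (canon l).2, i + (canon l).2 + (canon l).1 - 1, bcur l cur)
         else (best, bs, be, bcur l cur))) := by
  revert i best bs be cur
  induction l with
  | nil =>
    intro i best bs be cur hci hcb
    simp only [bloop, runAt, canon, bcur]
    rw [if_pos (by omega), if_neg (by omega)]
  | cons x xs ih =>
    intro i best bs be cur hci hcb
    have hge := canon_fst_ge_runAt xs
    by_cases hp : isPowerOfTwo x = true
    · have hr : runAt (x :: xs) = runAt xs + 1 := by simp [runAt, hp]
      have hbc : bcur (x :: xs) cur = bcur xs (cur + 1) := by simp [bcur, hp]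
      simp only [bloop, hp, if_true]
      rw [hr, hbc]
      by_cases hc : (canon xs).1 ≤ runAt xs + 1
      · have hcx : canon (x :: xs) = (runAt xs + 1, 0) := by
          simp [canon, ge_iff_le, runAt, hp, hc]
        rw [hcx]
        dsimp only
        by_cases hub : cur + 1 > best
        · rw [if_pos hub, ih (i + 1) (cur + 1) (i + 1 - (cur + 1)) i (cur + 1) (by omega) (by omega)]
          split_ifs <;> simp only [Prod.mk.injEq, true_and, and_true] <;> omega
        · rw [if_neg hub, ih (i + 1) best bs be (cur + 1) (by omega) (by omega)]
          split_ifs <;> simp only [Prod.mk.injEq, true_and, and_true] <;> omega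
      · have hcx : canon (x :: xs) = ((canon xs).1, (canon xs).2 + 1) := by
          simp [canon, ge_iff_le, runAt, hp, hc]
        rw [hcx]
        dsimp only
        by_cases hub : cur + 1 > best
        · rw [if_pos hub, ih (i + 1) (cur + 1) (i + 1 - (cur + 1)) i (cur + 1) (by omega) (by omega)]
          split_ifs <;> simp only [Prod.mk.injEq, true_and, and_true] <;> omega
        · rw [if_neg hub, ih (i + 1) best bs be (cur + 1) (by omega) (by omega)]
          split_ifs <;> simp only [Prod.mk.injEq, true_and, and_true] <;> omega
    · have hpf : isPowerOfTwo x = false := by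
        cases h : isPowerOfTwo x
        · rfl
        · exact absurd h hp
      have hr : runAt (x :: xs) = 0 := by simp [runAt, hpf]
      have hbc : bcur (x :: xs) cur = bcur xs 0 := by simp [bcur, hpf]
      simp only [bloop, hpf, Bool.false_eq_true, if_false]
      rw [ih (i + 1) best bs be 0 (by omega) (by omega), hr, hbc]
      by_cases hz : (canon xs).1 = 0
      · have hcx : canon (x :: xs) = (0, 0) := by
          simp [canon, ge_iff_le, runAt, hpf, hz]
        rw [hcx]
        dsimp only
        have hra : runAt xs = 0 := by omega
        rw [hra]
        split_ifs <;> simp only [Prod.mk.injEq, true_and, and_true] <;> omega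
      · have hcx : canon (x :: xs) = ((canon xs).1, (canon xs).2 + 1) := by
          simp [canon, ge_iff_le, runAt, hpf]
          omega
        rw [hcx]
        dsimp only
        by_cases ht : (canon xs).1 ≤ runAt xs
        · have hce : canon xs = (runAt xs, 0) := canon_of_runAt_ge xs ht
          rw [hce]
          dsimp only
          split_ifs <;> simp only [Prod.mk.injEq, true_and, and_true] <;> omega
        · split_ifs <;> simp only [Prod.mk.injEq, true_and, and_true] <;> omega

-- B's final loop state carries A's winning triple (and the trailing run length)
theorem bloop_eq_sfold (arr : List Int) :
    bloop arr 0 0 0 0 0 =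
      ((sfold arr 0 (0, 0, 0)).1, (sfold arr 0 (0, 0, 0)).2.1, (sfold arr 0 (0, 0, 0)).2.2,
        bcur arr 0) := by
  have hge := canon_fst_ge_runAt arr
  rw [bloop_eq_canon arr 0 0 0 0 0 (le_refl 0) (le_refl 0), sfold_eq_canon]
  by_cases hm : 0 < (canon arr).1
  · by_cases hr : (canon arr).1 ≤ runAt arr
    · have hce := canon_of_runAt_ge arr hr
      rw [hce]
      dsimp only
      split_ifs <;> simp only [Prod.mk.injEq, true_and, and_true] <;> omega
    · split_ifs <;> simp only [Prod.mk.injEq, true_and, and_true] <;> omega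
  · split_ifs <;> simp only [Prod.mk.injEq, true_and, and_true] <;> omega

-- ===== VERDICT (by name: the statement is the Claim_ definition above) =====
theorem get_max_sub_array_with_powers_of_two_spec : Claim_equal_get_max_sub_array_with_powers_of_two := by
  intro arr hdom
  unfold Spec_get_max_sub_array_with_powers_of_two
  unfold get_max_sub_array_with_powers_of_two get_max_sub_array_with_powers_of_two_alt
  dsimp only
  rw [show outerA arr 0 0 0 0 = sfold arr 0 (0, 0, 0) by simpa using outerA_eq_sfold arr 0 0 0 0]
  rw [bloop_eq_sfold arr]
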